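-- pv_equiv track=rewrite | github.com/soakula-cp/competitive-coding | scripts/lib/parser/base.py | read_include_and_usings
-- ===== SOURCE A (Python) =====
-- from typing import List
--
-- def read_include_and_usings(lines: List[str], idx: int):
--     number_of_lines = len(lines)
--     answer = []
--     while idx < number_of_lines:
--         if "clang-format off" in lines[idx]:
--             idx += 1
--             continue
--         if "clang-format on" in lines[idx]:
--             idx += 1
--             continue
--         if "namespace" in lines[idx]:
--             break
--         answer.append(lines[idx].rstrip())
--         idx += 1
--     return answer, idx
-- ===== SOURCE B (Python) =====
-- from typing import List
--
-- def _skip(line: str) -> bool: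
--     return "clang-format off" in line or "clang-format on" in line
--
-- def read_include_and_usings(lines: List[str], idx: int):
--     n = len(lines)
--     i = idx
--     # pass 1: find the stop position (first non-marker line containing "namespace")
--     while i < n and not ("namespace" in lines[i] and not _skip(lines[i])):
--         i += 1
--     # pass 2: collect the non-marker lines of [idx, i), right-stripped
--     answer = [lines[j].rstrip() for j in range(idx, i) if not _skip(lines[j])]
--     return answer, i
-- ===== Notes on version B (the rewrite author's own statement) =====
-- stated objective: alternative
-- what changed: A's single interleaved loop that skips clang-format marker lines, breaks on namespace and accumulates rstripped lines is replaced by two separate passes: one scan that only locates the stop index (first non-marker line containing 'namespace'), then a list comprehension that filters out marker lines and rstrips the slice [idx, stop).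
import Mathlib
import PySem

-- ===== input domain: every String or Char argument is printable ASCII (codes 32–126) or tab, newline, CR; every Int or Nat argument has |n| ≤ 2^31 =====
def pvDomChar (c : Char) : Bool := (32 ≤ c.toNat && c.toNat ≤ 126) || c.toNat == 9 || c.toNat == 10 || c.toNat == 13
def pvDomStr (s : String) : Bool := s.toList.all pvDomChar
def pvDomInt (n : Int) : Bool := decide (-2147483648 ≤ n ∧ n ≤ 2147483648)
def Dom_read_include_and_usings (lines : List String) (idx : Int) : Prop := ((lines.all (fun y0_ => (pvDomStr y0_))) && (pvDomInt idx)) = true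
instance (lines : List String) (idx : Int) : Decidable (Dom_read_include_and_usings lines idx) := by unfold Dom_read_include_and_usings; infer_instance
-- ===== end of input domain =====

-- B replaces A's single interleaved accumulate/skip/break loop by two passes: find the stop
-- index, then filter-and-rstrip the slice [idx, stop) (objective: alternative decomposition).

-- ===== PORT A =====
-- A's while-loop; fuel = (len(lines) - idx).toNat (the loop runs while idx < len(lines)).
def pvALoop (lines : List String) : Nat → Int → List String → List String × Int
  | 0, idx, acc => (acc, idx)
  | f + 1, idx, acc =>
    match PySem.List.pyGet? lines idx with
    | none => (acc, idx)   -- IndexError in Python; excluded by Pre_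
    | some s =>
      if PySem.Str.isIn "clang-format off" s then pvALoop lines f (idx + 1) acc
      else if PySem.Str.isIn "clang-format on" s then pvALoop lines f (idx + 1) acc
      else if PySem.Str.isIn "namespace" s then (acc, idx)
      else pvALoop lines f (idx + 1) (acc ++ [PySem.Str.rstrip s])

def read_include_and_usings (lines : List String) (idx : Int) : List String × Int :=
  pvALoop lines ((lines.length : Int) - idx).toNat idx []

-- ===== PORT B =====
def pvSkip (s : String) : Bool :=
  PySem.Str.isIn "clang-format off" s || PySem.Str.isIn "clang-format on" s

def pvStop (s : String) : Bool := PySem.Str.isIn "namespace" s && !pvSkip s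

-- pass 1: first i ≥ idx with i < len(lines) failing, or lines[i] a stop line
def pvFindStop (lines : List String) : Nat → Int → Int
  | 0, i => i
  | f + 1, i =>
    match PySem.List.pyGet? lines i with
    | none => i   -- IndexError in Python; excluded by Pre_
    | some s => if pvStop s then i else pvFindStop lines f (i + 1)

def read_include_and_usings_alt (lines : List String) (idx : Int) : List String × Int :=
  let stop := pvFindStop lines ((lines.length : Int) - idx).toNat idx
  ((PySem.List.pyRange idx stop 1).filterMap (fun j =>
      match PySem.List.pyGet? lines j with
      | none => none
      | some s => if pvSkip s then none else some (PySem.Str.rstrip s)),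
   stop)

-- ===== PRECONDITION & SPEC =====
-- Pre_ excludes exactly the inputs where Python A raises IndexError: idx < -len(lines)
-- (then idx < len(lines) and lines[idx] is out of range); B raises there too.
def Pre_read_include_and_usings (lines : List String) (idx : Int) : Prop :=
  -(lines.length : Int) ≤ idx
instance (lines : List String) (idx : Int) : Decidable (Pre_read_include_and_usings lines idx) := by unfold Pre_read_include_and_usings; infer_instance

def pvWitness_read_include_and_usings : List String × Int :=
  (["#include <vector>", "namespace foo {"], 0)

def Spec_read_include_and_usings (lines : List String) (idx : Int) (out : List String × Int) : Prop := out = read_include_and_usings_alt lines idx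
instance (lines : List String) (idx : Int) (out : List String × Int) : Decidable (Spec_read_include_and_usings lines idx out) := by unfold Spec_read_include_and_usings; infer_instance

-- ===== CLAIM (what is proved, stated in full; the proofs are below) =====
def Claim_equal_read_include_and_usings : Prop := ∀ (lines : List String) (idx : Int), Dom_read_include_and_usings lines idx → Pre_read_include_and_usings lines idx → Spec_read_include_and_usings lines idx (read_include_and_usings lines idx)

-- ===== LEMMAS AND PROOFS =====

lemma pvFindStop_ge (lines : List String) : ∀ (f : Nat) (i : Int), i ≤ pvFindStop lines f i := by
  intro f
  induction f with
  | zero => intro i; simp [pvFindStop]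
  | succ f ih =>
    intro i
    simp only [pvFindStop]
    cases h : PySem.List.pyGet? lines i with
    | none => exact le_refl i
    | some s =>
      by_cases hs : pvStop s = true
      · simp [hs]
      · simp only [hs]
        have := ih (i + 1); omega

lemma pvLoop_eq (lines : List String) :
    ∀ (f : Nat) (i : Int) (acc : List String),
      f = ((lines.length : Int) - i).toNat →
      -(lines.length : Int) ≤ i →
      pvALoop lines f i acc =
        (acc ++ (PySem.List.pyRange i (pvFindStop lines f i) 1).filterMap (fun j =>
            match PySem.List.pyGet? lines j with
            | none => none
            | some s => if pvSkip s then none else some (PySem.Str.rstrip s)),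
         pvFindStop lines f i) := by
  intro f
  induction f with
  | zero =>
    intro i acc _ _
    simp [pvALoop, pvFindStop, PySem.List.pyRange_one_eq_nil (le_refl i)]
  | succ f ih =>
    intro i acc hf hlo
    have hi : i < (lines.length : Int) := by omega
    have hsome : PySem.List.pyGet? lines i ≠ none := by
      intro h
      exact ((PySem.List.pyGet?_eq_none_iff lines i).mp h) ⟨hlo, hi⟩
    obtain ⟨s, hs⟩ : ∃ s, PySem.List.pyGet? lines i = some s := by
      cases h : PySem.List.pyGet? lines i with
      | none => exact absurd h hsome
      | some s => exact ⟨s, rfl⟩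
    have hf' : f = ((lines.length : Int) - (i + 1)).toNat := by omega
    have hlo' : -(lines.length : Int) ≤ i + 1 := by omega
    simp only [pvALoop, pvFindStop, hs]
    by_cases hoff : PySem.Str.isIn "clang-format off" s = true
    · -- marker line: skipped by A, not a stop for B, filtered out by B
      have hskip : pvSkip s = true := by unfold pvSkip; rw [hoff]; rfl
      have hstop : pvStop s = false := by unfold pvStop; rw [hskip]; simp
      have hlt : i < pvFindStop lines f (i + 1) :=
        lt_of_lt_of_le (by omega : i < i + 1) (pvFindStop_ge lines f (i + 1))
      simp only [hoff, hstop, Bool.false_eq_true, if_true, if_false]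
      rw [ih (i + 1) acc hf' hlo', PySem.List.pyRange_one_cons hlt]
      simp [hs, hskip]
    · have hoff' : PySem.Str.isIn "clang-format off" s = false :=
        Bool.eq_false_iff.mpr hoff
      by_cases hon : PySem.Str.isIn "clang-format on" s = true
      · have hskip : pvSkip s = true := by unfold pvSkip; rw [hon]; simp
        have hstop : pvStop s = false := by unfold pvStop; rw [hskip]; simp
        have hlt : i < pvFindStop lines f (i + 1) :=
          lt_of_lt_of_le (by omega : i < i + 1) (pvFindStop_ge lines f (i + 1))
        simp only [hoff', hon, hstop, Bool.false_eq_true, if_true, if_false]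
        rw [ih (i + 1) acc hf' hlo', PySem.List.pyRange_one_cons hlt]
        simp [hs, hskip]
      · have hon' : PySem.Str.isIn "clang-format on" s = false :=
          Bool.eq_false_iff.mpr hon
        have hskip : pvSkip s = false := by unfold pvSkip; rw [hoff', hon']; rfl
        by_cases hns : PySem.Str.isIn "namespace" s = true
        · -- stop line: A breaks, B's stop index is i and the comprehension range is empty
          have hstop : pvStop s = true := by unfold pvStop; rw [hns, hskip]; rfl
          simp only [hoff', hon', hns, hstop, Bool.false_eq_true, if_true, if_false,
            PySem.List.pyRange_one_eq_nil (le_refl i), List.filterMap_nil, List.append_nil]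
        · -- ordinary line: A appends its rstrip, B keeps it in the comprehension
          have hns' : PySem.Str.isIn "namespace" s = false := Bool.eq_false_iff.mpr hns
          have hstop : pvStop s = false := by unfold pvStop; rw [hns']; rfl
          have hlt : i < pvFindStop lines f (i + 1) :=
            lt_of_lt_of_le (by omega : i < i + 1) (pvFindStop_ge lines f (i + 1))
          simp only [hoff', hon', hns', hstop, Bool.false_eq_true, if_false]
          rw [ih (i + 1) (acc ++ [PySem.Str.rstrip s]) hf' hlo', PySem.List.pyRange_one_cons hlt]
          simp [hs, hskip]

-- ===== VERDICT (by name: the statement is the Claim_ definition above) =====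
theorem read_include_and_usings_spec : Claim_equal_read_include_and_usings := by
  intro lines idx _ hpre
  unfold Spec_read_include_and_usings read_include_and_usings read_include_and_usings_alt
  rw [pvLoop_eq lines _ idx [] rfl hpre]
  simp
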